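-- pv_equiv track=rewrite | github.com/eyw04/pod_ad_extraction_pipeline | split_ad_segments.py | merge_short
-- ===== SOURCE A (Python) =====
-- def merge_short(segs, min_len):
--     """Merge segments shorter than *min_len* into a neighbor.
--
--     Repeats until every segment meets the minimum or only one remains.
--     """
--     changed = True
--     while changed and len(segs) > 1:
--         changed = False
--         out = []
--         for i, (s, e) in enumerate(segs):
--             if not out:
--                 out.append((s, e))
--                 continue
--             if (e - s) < min_len:
--                 ps, pe = out[-1]
--                 out[-1] = (ps, e)
--                 changed = True
--             else:
--                 out.append((s, e))
--         if len(out) > 1 and (out[0][1] - out[0][0]) < min_len: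
--             out = [(out[0][0], out[1][1])] + out[2:]
--             changed = True
--         segs = out
--     return segs
-- ===== SOURCE B (Python) =====
-- def merge_short(segs, min_len):
--     """Merge segments shorter than *min_len* into a neighbor.
--
--     Right-to-left scan: every segment of length >= min_len starts a block
--     ending at the last end seen; leftover short segments fold into the
--     leading block.  Convergence is detected by the length staying the same.
--     """
--     while len(segs) > 1:
--         rev = []
--         end = None
--         for s, e in reversed(segs[1:]):
--             if end is None:
--                 end = e
--             if e - s >= min_len:
--                 rev.append((s, end))
--                 end = None
--         s0, e0 = segs[0]
--         rev.append((s0, end if end is not None else e0))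
--         out = rev[::-1]
--         if len(out) > 1 and out[0][1] - out[0][0] < min_len:
--             out = [(out[0][0], out[1][1])] + out[2:]
--         if len(out) == len(segs):
--             return out
--         segs = out
--     return segs
-- ===== Notes on version B (the rewrite author's own statement) =====
-- stated objective: alternative
-- what changed: B replaces A's mutate-the-last-output pass with a right-to-left scan that emits each merged block directly (every long segment closes a block at the last end seen, trailing shorts fold into the leading block) and replaces the 'changed' flag with a length-stability test for the fixpoint.
import Mathlib
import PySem

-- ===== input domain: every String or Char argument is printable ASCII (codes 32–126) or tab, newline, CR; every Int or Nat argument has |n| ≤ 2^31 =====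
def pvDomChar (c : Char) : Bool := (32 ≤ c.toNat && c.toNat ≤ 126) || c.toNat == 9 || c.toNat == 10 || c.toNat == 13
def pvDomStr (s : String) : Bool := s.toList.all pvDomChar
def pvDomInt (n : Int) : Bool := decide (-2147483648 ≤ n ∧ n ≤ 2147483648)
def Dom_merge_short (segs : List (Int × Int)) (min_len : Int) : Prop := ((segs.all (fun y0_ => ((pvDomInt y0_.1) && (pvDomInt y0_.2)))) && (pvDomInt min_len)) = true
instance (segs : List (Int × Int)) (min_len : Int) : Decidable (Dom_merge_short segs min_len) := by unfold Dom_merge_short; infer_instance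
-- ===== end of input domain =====

-- B rebuilds A's forward merge pass as a right-to-left scan emitting ready blocks and detects the
-- fixpoint by length stability instead of a changed flag; same values on every input (alternative).

-- ===== PORT A =====
-- one step of A's inner for-loop: state = (out, changed)
def mergeShortStepA (min_len : Int) (acc : List (Int × Int) × Bool) (p : Int × Int) :
    List (Int × Int) × Bool :=
  if acc.1 = [] then (acc.1 ++ [p], acc.2)
  else if p.2 - p.1 < min_len then
    match acc.1.getLast? with
    | some q => (acc.1.dropLast ++ [(q.1, p.2)], true)   -- out[-1] = (ps, e)
    | none => (acc.1, acc.2)                             -- unreachable: out nonempty here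
  else (acc.1 ++ [p], acc.2)

-- the front fix after the pass: returns (out, changed)
def mergeShortFrontA (min_len : Int) (out : List (Int × Int)) (changed : Bool) :
    List (Int × Int) × Bool :=
  match out with
  | a :: b :: rest => if a.2 - a.1 < min_len then ((a.1, b.2) :: rest, true) else (a :: b :: rest, changed)
  | _ => (out, changed)

-- A's while-loop; fuel only makes the recursion structural (length shrinks on every changed pass)
def mergeShortGoA (min_len : Int) : Nat → List (Int × Int) → List (Int × Int)
  | 0, segs => segs
  | fuel + 1, segs =>
    if 1 < segs.length then
      let st := segs.foldl (mergeShortStepA min_len) ([], false)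
      let fo := mergeShortFrontA min_len st.1 st.2
      if fo.2 then mergeShortGoA min_len fuel fo.1 else fo.1
    else segs

def merge_short (segs : List (Int × Int)) (min_len : Int) : List (Int × Int) :=
  mergeShortGoA min_len (segs.length + 1) segs

-- ===== PORT B =====
-- one step of B's scan over reversed(segs[1:]): state = (rev, end)
def mergeShortScanB (min_len : Int) (st : List (Int × Int) × Option Int) (p : Int × Int) :
    List (Int × Int) × Option Int :=
  let e2 := st.2.getD p.2                               -- if end is None: end = e
  if min_len ≤ p.2 - p.1 then (st.1 ++ [(p.1, e2)], none) else (st.1, some e2)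

-- B's while-loop; fuel only makes the recursion structural (length shrinks before every recursion)
def mergeShortGoB (min_len : Int) : Nat → List (Int × Int) → List (Int × Int)
  | 0, segs => segs
  | fuel + 1, segs =>
    if 1 < segs.length then
      match segs with
      | [] => segs                                      -- unreachable: length > 1
      | p0 :: rest =>
        let st := rest.reverse.foldl (mergeShortScanB min_len) ([], none)
        let out := (st.1 ++ [(p0.1, st.2.getD p0.2)]).reverse
        let out2 :=
          match out with
          | a :: b :: r => if a.2 - a.1 < min_len then (a.1, b.2) :: r else a :: b :: r
          | _ => out
        if out2.length = segs.length then out2 else mergeShortGoB min_len fuel out2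
    else segs

def merge_short_alt (segs : List (Int × Int)) (min_len : Int) : List (Int × Int) :=
  mergeShortGoB min_len (segs.length + 1) segs

-- ===== PRECONDITION & SPEC =====
def Spec_merge_short (segs : List (Int × Int)) (min_len : Int) (out : List (Int × Int)) : Prop := out = merge_short_alt segs min_len
instance (segs : List (Int × Int)) (min_len : Int) (out : List (Int × Int)) : Decidable (Spec_merge_short segs min_len out) := by unfold Spec_merge_short; infer_instance

-- ===== CLAIM (what is proved, stated in full; the proofs are below) =====
def Claim_equal_merge_short : Prop := ∀ (segs : List (Int × Int)) (min_len : Int), Dom_merge_short segs min_len → Spec_merge_short segs min_len (merge_short segs min_len)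

-- ===== LEMMAS AND PROOFS =====

-- proof-side normal form of the merge pass: blocks built front-to-back
def blkGo (m : Int) : Int × Int → List (Int × Int) → List (Int × Int)
  | cur, [] => [cur]
  | cur, p :: t => if p.2 - p.1 < m then blkGo m (cur.1, p.2) t else cur :: blkGo m p t

def longP (m : Int) (p : Int × Int) : Bool := decide (m ≤ p.2 - p.1)

theorem foldlA_eq_blkGo (m : Int) :
    ∀ (t : List (Int × Int)) (l : List (Int × Int)) (q : Int × Int) (ch : Bool),
      t.foldl (mergeShortStepA m) (l ++ [q], ch) =
        (l ++ blkGo m q t, ch || t.any (fun p => decide (p.2 - p.1 < m))) := by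
  intro t
  induction t with
  | nil => intro l q ch; simp [blkGo]
  | cons p t ih =>
    intro l q ch
    simp only [List.foldl_cons]
    by_cases hs : p.2 - p.1 < m
    · have hstep : mergeShortStepA m (l ++ [q], ch) p = (l ++ [(q.1, p.2)], true) := by
        simp [mergeShortStepA, hs]
      rw [hstep, ih]
      simp [blkGo, hs]
    · have hstep : mergeShortStepA m (l ++ [q], ch) p = ((l ++ [q]) ++ [p], ch) := by
        simp [mergeShortStepA, hs]
      rw [hstep, ih]
      simp [blkGo, hs]

theorem scanB_eq_blkGo (m : Int) :
    ∀ (t : List (Int × Int)) (cur : Int × Int),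
      ((t.reverse.foldl (mergeShortScanB m) ([], none)).1 ++
        [(cur.1, (t.reverse.foldl (mergeShortScanB m) ([], none)).2.getD cur.2)]).reverse =
      blkGo m cur t := by
  intro t
  induction t with
  | nil => intro cur; simp [blkGo]
  | cons p t ih =>
    intro cur
    rw [List.reverse_cons, List.foldl_append]
    simp only [List.foldl_cons, List.foldl_nil]
    by_cases hs : p.2 - p.1 < m
    · have : mergeShortScanB m (t.reverse.foldl (mergeShortScanB m) ([], none)) p =
          ((t.reverse.foldl (mergeShortScanB m) ([], none)).1,
            some ((t.reverse.foldl (mergeShortScanB m) ([], none)).2.getD p.2)) := by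
        simp [mergeShortScanB, not_le.mpr hs]
      rw [this]
      simp only [Option.getD_some, blkGo, if_pos hs]
      exact ih (cur.1, p.2)
    · have : mergeShortScanB m (t.reverse.foldl (mergeShortScanB m) ([], none)) p =
          ((t.reverse.foldl (mergeShortScanB m) ([], none)).1 ++
            [(p.1, (t.reverse.foldl (mergeShortScanB m) ([], none)).2.getD p.2)], none) := by
        simp [mergeShortScanB, not_lt.mp hs]
      rw [this]
      simp only [Option.getD_none, blkGo, if_neg hs]
      rw [List.append_assoc, List.reverse_append, ← ih p]
      simp

theorem blkGo_length (m : Int) :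
    ∀ (t : List (Int × Int)) (cur : Int × Int),
      (blkGo m cur t).length = 1 + t.countP (longP m) := by
  intro t
  induction t with
  | nil => intro cur; simp [blkGo]
  | cons p t ih =>
    intro cur
    by_cases hs : p.2 - p.1 < m
    · have h1 : longP m p = false := by simp only [longP, decide_eq_false_iff_not]; omega
      simp [blkGo, hs, h1, ih]
    · have h1 : longP m p = true := by simp only [longP, decide_eq_true_eq]; omega
      simp [blkGo, hs, h1, ih]
      omega

theorem any_short_iff (m : Int) :
    ∀ (t : List (Int × Int)),
      ((t.any (fun p => decide (p.2 - p.1 < m))) = true ↔ t.countP (longP m) < t.length) := by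
  intro t
  induction t with
  | nil => simp
  | cons p t ih =>
    by_cases hs : p.2 - p.1 < m
    · have h1 : longP m p = false := by simp only [longP, decide_eq_false_iff_not]; omega
      have := List.countP_le_length (p := longP m) (l := t)
      simp [h1, hs]
      omega
    · have h1 : longP m p = true := by simp only [longP, decide_eq_true_eq]; omega
      simp [h1, hs, ih]

theorem go_eq (m : Int) : ∀ (fuel : Nat) (segs : List (Int × Int)),
    mergeShortGoA m fuel segs = mergeShortGoB m fuel segs := by
  intro fuel
  induction fuel with
  | zero => intro segs; rfl
  | succ f ih =>
    intro segs
    by_cases h : 1 < segs.length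
    · match segs with
      | [] => simp at h
      | p0 :: rest =>
        have hr : 0 < rest.length := by simp only [List.length_cons] at h; omega
        have hA : (p0 :: rest).foldl (mergeShortStepA m) ([], false) =
            (blkGo m p0 rest, rest.any (fun p => decide (p.2 - p.1 < m))) := by
          have h0 : mergeShortStepA m ([], false) p0 = ([] ++ [p0], false) := by
            simp [mergeShortStepA]
          rw [List.foldl_cons, h0, foldlA_eq_blkGo]
          simp
        have hB := scanB_eq_blkGo m rest p0
        have hlen := blkGo_length m rest p0
        have hle := List.countP_le_length (p := longP m) (l := rest)
        have hany := any_short_iff m rest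
        simp only [mergeShortGoA, mergeShortGoB, if_pos h]
        rw [hA, hB]
        cases hbl : blkGo m p0 rest with
        | nil =>
          rw [hbl] at hlen
          simp only [List.length_nil] at hlen
          exact absurd hlen (by omega)
        | cons a tl =>
          cases tl with
          | nil =>
            rw [hbl] at hlen
            simp only [List.length_cons, List.length_nil] at hlen
            have ha : rest.any (fun p => decide (p.2 - p.1 < m)) = true := by
              rw [hany]; omega
            simp only [mergeShortFrontA, ha, List.length_cons, List.length_nil]
            rw [if_pos trivial, if_neg (by omega)]
            exact ih _
          | cons b r =>
            rw [hbl] at hlen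
            simp only [List.length_cons] at hlen
            by_cases hf : a.2 - a.1 < m
            · simp only [mergeShortFrontA, if_pos hf, List.length_cons]
              rw [if_pos trivial, if_neg (by omega)]
              exact ih _
            · simp only [mergeShortFrontA, if_neg hf, List.length_cons]
              by_cases ha : rest.any (fun p => decide (p.2 - p.1 < m)) = true
              · have hk := hany.mp ha
                rw [if_pos ha, if_neg (by omega)]
                exact ih _
              · have hk : List.countP (longP m) rest = rest.length := by
                  rcases Nat.lt_or_ge (List.countP (longP m) rest) rest.length with h' | h'
                  · exact absurd (hany.mpr h') ha
                  · omega
                rw [if_neg ha, if_pos (by omega)]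
    · match segs with
      | [] => rfl
      | [p] => rfl
      | p :: q :: r => simp at h

-- ===== VERDICT (by name: the statement is the Claim_ definition above) =====
theorem merge_short_spec : Claim_equal_merge_short := by
  intro segs min_len _
  unfold Spec_merge_short merge_short merge_short_alt
  exact go_eq min_len (segs.length + 1) segs
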